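-- pv_equiv track=rewrite | github.com/Yab112/aegis-agent | src/agent/nodes.py | _match_slot_to_availability
-- ===== SOURCE A (Python) =====
-- def _match_slot_to_availability(user_query: str, slots: list[dict]) -> dict | None:
--     """Map user wording to a slot; None lets calendar_node fall back to first slot."""
--     if not slots:
--         return None
--     q = user_query.lower()
--     if any(x in q for x in ("first", "earliest", "soonest", "first slot", "option 1", "#1", "1.", " slot 1")):
--         return slots[0]
--     if len(slots) > 1 and any(x in q for x in ("second", "option 2", "#2", "2.", " slot 2")):
--         return slots[1]
--     if len(slots) > 2 and any(x in q for x in ("third", "option 3", "#3", "3.", " slot 3")):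
--         return slots[2]
--     return None
-- ===== SOURCE B (Python) =====
-- _PHRASE_INDEX = [
--     ("first", 0), ("earliest", 0), ("soonest", 0), ("first slot", 0),
--     ("option 1", 0), ("#1", 0), ("1.", 0), (" slot 1", 0),
--     ("second", 1), ("option 2", 1), ("#2", 1), ("2.", 1), (" slot 2", 1),
--     ("third", 2), ("option 3", 2), ("#3", 2), ("3.", 2), (" slot 3", 2),
-- ]
--
--
-- def _match_slot_to_availability(user_query: str, slots: list) -> dict | None:
--     if not slots:
--         return None
--     q = user_query.lower()
--     best = min((i for p, i in _PHRASE_INDEX if p in q), default=None)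
--     if best is not None and best < len(slots):
--         return slots[best]
--     return None
-- ===== Notes on version B (the rewrite author's own statement) =====
-- stated objective: alternative
-- what changed: Replaces A's three ordered guarded group branches with a single scan over one flat phrase->index table that aggregates the minimum matched slot index, followed by one final bounds check against len(slots).
import Mathlib
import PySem

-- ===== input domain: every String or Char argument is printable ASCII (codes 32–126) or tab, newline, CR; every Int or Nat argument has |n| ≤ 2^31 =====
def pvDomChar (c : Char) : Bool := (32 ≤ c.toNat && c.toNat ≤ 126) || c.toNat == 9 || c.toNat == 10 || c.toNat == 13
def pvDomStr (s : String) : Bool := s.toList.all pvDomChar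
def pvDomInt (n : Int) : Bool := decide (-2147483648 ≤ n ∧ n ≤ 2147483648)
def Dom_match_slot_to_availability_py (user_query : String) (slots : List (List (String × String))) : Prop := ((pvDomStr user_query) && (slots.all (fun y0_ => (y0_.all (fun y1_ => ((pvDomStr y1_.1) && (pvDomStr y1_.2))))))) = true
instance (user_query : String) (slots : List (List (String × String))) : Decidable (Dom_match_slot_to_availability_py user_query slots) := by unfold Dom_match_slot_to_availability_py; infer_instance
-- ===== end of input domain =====

-- B: one flat phrase->index table, a min-aggregating scan and a single final bounds check replace A's three ordered guarded group branches (objective: alternative).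


-- ===== PORT A =====
def match_slot_to_availability_py (user_query : String) (slots : List (List (String × String))) : Option (List (String × String)) :=
  if slots = [] then none
  else
    let q := PySem.Str.lower user_query
    if ["first", "earliest", "soonest", "first slot", "option 1", "#1", "1.", " slot 1"].any (fun x => PySem.Str.isIn x q) then
      PySem.List.pyGet? slots 0
    else if slots.length > 1 && ["second", "option 2", "#2", "2.", " slot 2"].any (fun x => PySem.Str.isIn x q) then
      PySem.List.pyGet? slots 1
    else if slots.length > 2 && ["third", "option 3", "#3", "3.", " slot 3"].any (fun x => PySem.Str.isIn x q) then
      PySem.List.pyGet? slots 2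
    else none

-- ===== PORT B =====
-- flat phrase -> slot-index table (B's data structure)
def pvPhraseIndex : List (String × Nat) :=
  [("first", 0), ("earliest", 0), ("soonest", 0), ("first slot", 0),
   ("option 1", 0), ("#1", 0), ("1.", 0), (" slot 1", 0),
   ("second", 1), ("option 2", 1), ("#2", 1), ("2.", 1), (" slot 2", 1),
   ("third", 2), ("option 3", 2), ("#3", 2), ("3.", 2), (" slot 3", 2)]

-- the scan step: keep the minimum matched index ('min(..., default=None)' as a fold)
def pvStep (q : String) (acc : Option Nat) (pi : String × Nat) : Option Nat :=
  if PySem.Str.isIn pi.1 q then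
    some (match acc with | none => pi.2 | some j => min j pi.2)
  else acc

def match_slot_to_availability_py_alt (user_query : String) (slots : List (List (String × String))) : Option (List (String × String)) :=
  if slots = [] then none
  else
    let q := PySem.Str.lower user_query
    let best : Option Nat := pvPhraseIndex.foldl (pvStep q) none
    match best with
    | some i => if i < slots.length then PySem.List.pyGet? slots (i : Int) else none
    | none => none

-- ===== PRECONDITION & SPEC =====
def Spec_match_slot_to_availability_py (user_query : String) (slots : List (List (String × String))) (out : Option (List (String × String))) : Prop := out = match_slot_to_availability_py_alt user_query slots
instance (user_query : String) (slots : List (List (String × String))) (out : Option (List (String × String))) : Decidable (Spec_match_slot_to_availability_py user_query slots out) := by unfold Spec_match_slot_to_availability_py; infer_instance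

-- ===== CLAIM (what is proved, stated in full; the proofs are below) =====
def Claim_equal_match_slot_to_availability_py : Prop := ∀ (user_query : String) (slots : List (List (String × String))), Dom_match_slot_to_availability_py user_query slots → Spec_match_slot_to_availability_py user_query slots (match_slot_to_availability_py user_query slots)

-- ===== LEMMAS AND PROOFS =====

def pvAccMin (acc : Option Nat) (i : Nat) : Nat :=
  match acc with | none => i | some j => min j i

theorem pvAccMin_idem (acc : Option Nat) (i : Nat) :
    pvAccMin (some (pvAccMin acc i)) i = pvAccMin acc i := by
  cases acc <;> simp [pvAccMin, Nat.min_assoc]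

-- folding a block of entries sharing one index i aggregates exactly "any of these phrases matched"
theorem pvFold_group (q : String) (ps : List String) (i : Nat) (acc : Option Nat) :
    (ps.map (fun p => (p, i))).foldl (pvStep q) acc =
      if ps.any (fun p => PySem.Str.isIn p q) then some (pvAccMin acc i) else acc := by
  induction ps generalizing acc with
  | nil => simp
  | cons p rest ih =>
    simp only [List.map_cons, List.foldl_cons, List.any_cons]
    by_cases h : PySem.Str.isIn p q = true
    · have h2 : pvStep q acc (p, i) = some (pvAccMin acc i) := by
        unfold pvStep; rw [if_pos h]; rfl
      rw [h2, ih]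
      simp only [h, Bool.true_or, if_true, pvAccMin_idem]
      split <;> rfl
    · rw [Bool.not_eq_true] at h
      have h2 : pvStep q acc (p, i) = acc := by
        simp only [pvStep, h, Bool.false_eq_true, if_false]
      rw [h2, ih]
      simp only [h, Bool.false_or]

theorem pvTable_split :
    pvPhraseIndex =
      (["first", "earliest", "soonest", "first slot", "option 1", "#1", "1.", " slot 1"].map (fun p => (p, 0)))
      ++ (["second", "option 2", "#2", "2.", " slot 2"].map (fun p => (p, 1)))
      ++ (["third", "option 3", "#3", "3.", " slot 3"].map (fun p => (p, 2))) := by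
  rfl

-- the scan's result as a function of the three grouped matches
theorem pvBest_eq (q : String) :
    pvPhraseIndex.foldl (pvStep q) none =
      if ["first", "earliest", "soonest", "first slot", "option 1", "#1", "1.", " slot 1"].any (fun x => PySem.Str.isIn x q) then some 0
      else if ["second", "option 2", "#2", "2.", " slot 2"].any (fun x => PySem.Str.isIn x q) then some 1
      else if ["third", "option 3", "#3", "3.", " slot 3"].any (fun x => PySem.Str.isIn x q) then some 2
      else none := by
  rw [pvTable_split, List.foldl_append, List.foldl_append,
      pvFold_group, pvFold_group, pvFold_group]
  cases h0 : ["first", "earliest", "soonest", "first slot", "option 1", "#1", "1.", " slot 1"].any (fun x => PySem.Str.isIn x q) <;>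
  cases h1 : ["second", "option 2", "#2", "2.", " slot 2"].any (fun x => PySem.Str.isIn x q) <;>
  cases h2 : ["third", "option 3", "#3", "3.", " slot 3"].any (fun x => PySem.Str.isIn x q) <;>
    simp only [Bool.false_eq_true, if_false, if_true, pvAccMin] <;> rfl

-- ===== VERDICT (by name: the statement is the Claim_ definition above) =====
theorem match_slot_to_availability_py_spec : Claim_equal_match_slot_to_availability_py := by
  intro uq slots _
  unfold Spec_match_slot_to_availability_py match_slot_to_availability_py match_slot_to_availability_py_alt
  by_cases hnil : slots = []
  · simp [hnil]
  · simp only [hnil, if_false]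
    rw [pvBest_eq]
    have hlen : 0 < slots.length := List.length_pos_iff.mpr hnil
    cases h0 : (["first", "earliest", "soonest", "first slot", "option 1", "#1", "1.", " slot 1"].any (fun x => PySem.Str.isIn x (PySem.Str.lower uq))) with
    | true => simp only [h0, if_true]; simp [hlen]
    | false =>
      simp only [h0, Bool.false_eq_true, if_false, Bool.false_and]
      cases h1 : (["second", "option 2", "#2", "2.", " slot 2"].any (fun x => PySem.Str.isIn x (PySem.Str.lower uq))) with
      | true =>
        by_cases hl1 : 1 < slots.length
        · simp [h1, hl1]
        · have hl2 : ¬ 2 < slots.length := by omega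
          simp [h1, hl1, hl2]
      | false =>
        simp only [h1, Bool.false_eq_true, if_false, Bool.and_false]
        cases h2 : (["third", "option 3", "#3", "3.", " slot 3"].any (fun x => PySem.Str.isIn x (PySem.Str.lower uq))) with
        | true =>
          by_cases hl2 : 2 < slots.length
          · simp [h2, hl2]
          · simp [h2, hl2]
        | false => simp [h2]
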